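-- pv_equiv track=rewrite | github.com/CardSorting/untitled-folder-22 | typing_rhythm_game/game/mechanics.py | _get_available_power_ups
-- ===== SOURCE A (Python) =====
-- from typing import Dict, List, Tuple, Optional
--
-- def _get_available_power_ups(level: int) -> List[str]:
--     """Get available power-ups based on level."""
--     all_power_ups = {
--         'time_freeze': 1,      # Freezes the timer temporarily
--         'point_boost': 1,      # Doubles points for next word
--         'shield': 2,           # Prevents combo break on next mistake
--         'slow_motion': 3,      # Slows down word movement
--         'instant_clear': 4,    # Instantly completes current word
--         'combo_lock': 5        # Maintains combo for next 3 words
--     }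
--     return [
--         power_up for power_up, req_level in all_power_ups.items()
--         if req_level <= level
--     ]
-- ===== SOURCE B (Python) =====
-- import bisect
--
-- _POWER_UP_NAMES = ['time_freeze', 'point_boost', 'shield', 'slow_motion', 'instant_clear', 'combo_lock']
-- _POWER_UP_LEVELS = [1, 1, 2, 3, 4, 5]
--
-- def _get_available_power_ups(level: int):
--     """Get available power-ups based on level: binary-search the sorted
--     threshold list for the cutoff, return the prefix of names."""
--     cut = bisect.bisect_right(_POWER_UP_LEVELS, level)
--     return _POWER_UP_NAMES[:cut]
-- ===== Notes on version B (the rewrite author's own statement) =====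
-- stated objective: alternative
-- what changed: Replaced the dict-comprehension linear filter with a sorted parallel threshold table plus bisect_right binary search returning a prefix slice of the names.
import Mathlib
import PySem

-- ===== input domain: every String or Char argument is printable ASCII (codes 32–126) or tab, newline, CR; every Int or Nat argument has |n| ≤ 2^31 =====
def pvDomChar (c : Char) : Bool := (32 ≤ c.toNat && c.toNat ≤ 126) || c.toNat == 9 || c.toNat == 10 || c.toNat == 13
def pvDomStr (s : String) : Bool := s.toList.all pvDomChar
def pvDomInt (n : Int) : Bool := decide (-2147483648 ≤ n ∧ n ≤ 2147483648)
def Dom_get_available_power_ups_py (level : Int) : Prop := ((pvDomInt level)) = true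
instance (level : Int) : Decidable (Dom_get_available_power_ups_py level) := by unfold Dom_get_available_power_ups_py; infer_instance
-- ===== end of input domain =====

-- B replaces A's linear dict-comprehension filter with bisect_right on a sorted
-- threshold table followed by a prefix slice of the names (alternative decomposition).

-- ===== PORT A =====
-- Port of A: the dict literal as an insertion-order association list; the
-- comprehension filters by req_level <= level and keeps the keys.
def get_available_power_ups_py (level : Int) : List String :=
  let all_power_ups : List (String × Int) :=
    [("time_freeze", 1), ("point_boost", 1), ("shield", 2),
     ("slow_motion", 3), ("instant_clear", 4), ("combo_lock", 5)]
  (all_power_ups.filter (fun p => p.2 ≤ level)).map Prod.fst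

-- ===== PORT B =====
-- Port of B: bisect_right on the sorted threshold table, then a prefix slice of the names.
def get_available_power_ups_py_alt (level : Int) : List String :=
  let names : List String :=
    ["time_freeze", "point_boost", "shield", "slow_motion", "instant_clear", "combo_lock"]
  let levels : List Int := [1, 1, 2, 3, 4, 5]
  let cut := PySem.List.bisectRight levels level
  PySem.List.slice names none (some (cut : Int))

-- ===== PRECONDITION & SPEC =====
def Spec_get_available_power_ups_py (level : Int) (out : List String) : Prop := out = get_available_power_ups_py_alt level
instance (level : Int) (out : List String) : Decidable (Spec_get_available_power_ups_py level out) := by unfold Spec_get_available_power_ups_py; infer_instance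

-- ===== CLAIM (what is proved, stated in full; the proofs are below) =====
def Claim_equal_get_available_power_ups_py : Prop := ∀ (level : Int), Dom_get_available_power_ups_py level → Spec_get_available_power_ups_py level (get_available_power_ups_py level)

-- ===== LEMMAS AND PROOFS =====

-- ===== VERDICT (by name: the statement is the Claim_ definition above) =====
theorem get_available_power_ups_py_spec : Claim_equal_get_available_power_ups_py := by
  intro level _
  unfold Spec_get_available_power_ups_py get_available_power_ups_py get_available_power_ups_py_alt
  by_cases h1 : level < 1
  · simp [PySem.List.bisectRight, PySem.List.bisectRightLoop, PySem.List.slice, PySem.List.clampIdx,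
        show level < 1 by omega,
        show ¬(1:Int) ≤ level by omega,
        show ¬(2:Int) ≤ level by omega,
        show level < 3 by omega,
        show ¬(3:Int) ≤ level by omega,
        show ¬(4:Int) ≤ level by omega,
        show ¬(5:Int) ≤ level by omega]
  · by_cases h2 : level < 2
    · simp [PySem.List.bisectRight, PySem.List.bisectRightLoop, PySem.List.slice, PySem.List.clampIdx,
        show ¬level < 1 by omega,
        show (1:Int) ≤ level by omega,
        show level < 2 by omega,
        show ¬(2:Int) ≤ level by omega,
        show level < 3 by omega,
        show ¬(3:Int) ≤ level by omega,
        show ¬(4:Int) ≤ level by omega,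
        show ¬(5:Int) ≤ level by omega]
    · by_cases h3 : level < 3
      · simp [PySem.List.bisectRight, PySem.List.bisectRightLoop, PySem.List.slice, PySem.List.clampIdx,
        show ¬level < 1 by omega,
        show (1:Int) ≤ level by omega,
        show ¬level < 2 by omega,
        show (2:Int) ≤ level by omega,
        show level < 3 by omega,
        show ¬(3:Int) ≤ level by omega,
        show ¬(4:Int) ≤ level by omega,
        show ¬(5:Int) ≤ level by omega]
      · by_cases h4 : level < 4
        · simp [PySem.List.bisectRight, PySem.List.bisectRightLoop, PySem.List.slice, PySem.List.clampIdx,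
        show (1:Int) ≤ level by omega,
        show (2:Int) ≤ level by omega,
        show ¬level < 3 by omega,
        show (3:Int) ≤ level by omega,
        show level < 4 by omega,
        show ¬(4:Int) ≤ level by omega,
        show level < 5 by omega,
        show ¬(5:Int) ≤ level by omega]
        · by_cases h5 : level < 5
          · simp [PySem.List.bisectRight, PySem.List.bisectRightLoop, PySem.List.slice, PySem.List.clampIdx,
        show (1:Int) ≤ level by omega,
        show (2:Int) ≤ level by omega,
        show ¬level < 3 by omega,
        show (3:Int) ≤ level by omega,
        show ¬level < 4 by omega,
        show (4:Int) ≤ level by omega,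
        show level < 5 by omega,
        show ¬(5:Int) ≤ level by omega]
          · simp [PySem.List.bisectRight, PySem.List.bisectRightLoop, PySem.List.slice, PySem.List.clampIdx,
        show (1:Int) ≤ level by omega,
        show (2:Int) ≤ level by omega,
        show ¬level < 3 by omega,
        show (3:Int) ≤ level by omega,
        show (4:Int) ≤ level by omega,
        show ¬level < 5 by omega,
        show (5:Int) ≤ level by omega]
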